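-- pv_equiv track=rewrite | github.com/gaurav-niranjan/video_analytics | Ex3/src/metrics.py | get_labels_start_end_time
-- ===== SOURCE A (Python) =====
-- def get_labels_start_end_time(frame_wise_labels, bg_class=[]):
--     labels = []
--     starts = []
--     ends = []
--     last_label = frame_wise_labels[0]
--     if frame_wise_labels[0] not in bg_class:
--         labels.append(frame_wise_labels[0])
--         starts.append(0)
--     for i in range(len(frame_wise_labels)):
--         if frame_wise_labels[i] != last_label:
--             if frame_wise_labels[i] not in bg_class:
--                 labels.append(frame_wise_labels[i])
--                 starts.append(i)
--             if last_label not in bg_class: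
--                 ends.append(i)
--             last_label = frame_wise_labels[i]
--     if last_label not in bg_class:
--         ends.append(i + 1)
--     return labels, starts, ends
-- ===== SOURCE B (Python) =====
-- def get_labels_start_end_time(frame_wise_labels, bg_class=[]):
--     # group-then-filter: boundaries of maximal constant runs, then one filtered pass
--     starts_all = [0] + [i + 1 for i, (a, b) in enumerate(zip(frame_wise_labels, frame_wise_labels[1:])) if a != b]
--     ends_all = starts_all[1:] + [len(frame_wise_labels)]
--     labels, starts, ends = [], [], []
--     for s, e in zip(starts_all, ends_all):
--         label = frame_wise_labels[s]
--         if label not in bg_class: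
--             labels.append(label)
--             starts.append(s)
--             ends.append(e)
--     return labels, starts, ends
-- ===== Notes on version B (the rewrite author's own statement) =====
-- stated objective: simpler
-- what changed: B replaces A's stateful last_label tracking with first/last-frame special cases by a group-then-filter decomposition: compute all run boundaries from consecutive unequal pairs, pair starts with ends by a shifted zip, then one filtered pass emits the non-background runs.
import Mathlib
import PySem

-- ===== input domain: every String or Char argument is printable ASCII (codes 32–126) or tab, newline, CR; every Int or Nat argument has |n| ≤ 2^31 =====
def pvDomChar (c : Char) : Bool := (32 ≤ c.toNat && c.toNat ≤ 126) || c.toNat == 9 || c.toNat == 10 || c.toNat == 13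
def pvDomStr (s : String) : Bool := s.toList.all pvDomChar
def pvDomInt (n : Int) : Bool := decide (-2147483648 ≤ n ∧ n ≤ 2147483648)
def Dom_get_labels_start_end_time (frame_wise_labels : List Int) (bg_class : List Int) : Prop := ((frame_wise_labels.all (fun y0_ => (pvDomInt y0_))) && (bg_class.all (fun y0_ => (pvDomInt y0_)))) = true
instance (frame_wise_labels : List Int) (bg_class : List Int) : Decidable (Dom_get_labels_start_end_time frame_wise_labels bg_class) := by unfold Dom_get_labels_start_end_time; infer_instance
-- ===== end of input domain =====

-- B replaces A's stateful last_label loop by a group-then-filter decomposition (run boundaries, then one filtered pass); equivalence is proved on nonempty inputs (A raises IndexError on []).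

-- ===== PORT A =====
def get_labels_start_end_time (frame_wise_labels : List Int) (bg_class : List Int) : List Int × List Int × List Int :=
  match frame_wise_labels with
  | [] => ([], [], [])  -- Python raises IndexError at frame_wise_labels[0]; excluded by Pre_
  | f0 :: _ =>
    -- labels/starts initialised from frame 0, then the i-loop with last_label in the state
    let init : (List Int × List Int) × List Int × Int :=
      if bg_class.contains f0 then ((([] : List Int), ([] : List Int)), ([] : List Int), f0)
      else (([f0], [(0 : Int)]), ([] : List Int), f0)
    let st :=
      (PySem.List.pyRange 0 (PySem.List.len frame_wise_labels) 1).foldl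
        (fun st i =>
          if PySem.List.pyGetD frame_wise_labels i 0 ≠ st.2.2 then
            ((if bg_class.contains (PySem.List.pyGetD frame_wise_labels i 0) then st.1.1
                else st.1.1 ++ [PySem.List.pyGetD frame_wise_labels i 0],
              if bg_class.contains (PySem.List.pyGetD frame_wise_labels i 0) then st.1.2 else st.1.2 ++ [i]),
             (if bg_class.contains st.2.2 then st.2.1 else st.2.1 ++ [i]),
             PySem.List.pyGetD frame_wise_labels i 0)
          else st)
        init
    (st.1.1, st.1.2,
      -- ends.append(i + 1) with i = len - 1 after the loop over range(len)
      if bg_class.contains st.2.2 then st.2.1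
      else st.2.1 ++ [PySem.List.len frame_wise_labels])

-- ===== PORT B =====
def get_labels_start_end_time_alt (frame_wise_labels : List Int) (bg_class : List Int) : List Int × List Int × List Int :=
  -- starts_all = [0] + [i + 1 for i, (a, b) in enumerate(zip(fw, fw[1:])) if a != b]
  let starts_all : List Int :=
    (0 : Int) ::
      (PySem.List.enumerate (frame_wise_labels.zip (PySem.List.slice frame_wise_labels (some 1) none)) 0).filterMap
        (fun p => if p.2.1 ≠ p.2.2 then some (p.1 + 1) else none)
  -- ends_all = starts_all[1:] + [len(fw)]
  let ends_all : List Int := PySem.List.slice starts_all (some 1) none ++ [PySem.List.len frame_wise_labels]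
  (starts_all.zip ends_all).foldl
    (fun acc se =>
      let label := PySem.List.pyGetD frame_wise_labels se.1 0
      if bg_class.contains label then acc
      else (acc.1 ++ [label], acc.2.1 ++ [se.1], acc.2.2 ++ [se.2]))
    (([] : List Int), ([] : List Int), ([] : List Int))

-- ===== PRECONDITION & SPEC =====
-- Pre_ excludes only the empty frame list, on which the Python A (and B) raise IndexError.
def Pre_get_labels_start_end_time (frame_wise_labels : List Int) (bg_class : List Int) : Prop :=
  frame_wise_labels ≠ []
instance (frame_wise_labels : List Int) (bg_class : List Int) : Decidable (Pre_get_labels_start_end_time frame_wise_labels bg_class) := by unfold Pre_get_labels_start_end_time; infer_instance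
def pvWitness_get_labels_start_end_time : List Int × List Int := ([1, 1, 2, 0, 2, 2], [0])
def Spec_get_labels_start_end_time (frame_wise_labels : List Int) (bg_class : List Int) (out : List Int × List Int × List Int) : Prop := out = get_labels_start_end_time_alt frame_wise_labels bg_class
instance (frame_wise_labels : List Int) (bg_class : List Int) (out : List Int × List Int × List Int) : Decidable (Spec_get_labels_start_end_time frame_wise_labels bg_class out) := by unfold Spec_get_labels_start_end_time; infer_instance

-- ===== CLAIM (what is proved, stated in full; the proofs are below) =====
def Claim_equal_get_labels_start_end_time : Prop := ∀ (frame_wise_labels : List Int) (bg_class : List Int), Dom_get_labels_start_end_time frame_wise_labels bg_class → Pre_get_labels_start_end_time frame_wise_labels bg_class → Spec_get_labels_start_end_time frame_wise_labels bg_class (get_labels_start_end_time frame_wise_labels bg_class)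

-- ===== LEMMAS AND PROOFS =====

-- maximal runs of equal labels: current run has label cur, started at start; k = index of the next frame
def runsAux (cur start k : Int) : List Int → List (Int × Int × Int)
  | [] => [(cur, start, k)]
  | y :: ys => if y = cur then runsAux cur start (k + 1) ys else (cur, start, k) :: runsAux y k (k + 1) ys

-- indices where the label changes
def changes (cur k : Int) : List Int → List Int
  | [] => []
  | y :: ys => if y = cur then changes y (k + 1) ys else k :: changes y (k + 1) ys

-- the common target: non-background runs, unzipped
def unz (bg : List Int) (R : List (Int × Int × Int)) : List Int × List Int × List Int :=
  let F := R.filter (fun r => !(bg.contains r.1))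
  (F.map (·.1), F.map (·.2.1), F.map (·.2.2))

-- A's loop body on enumerated pairs
def stepA (bg : List Int) (st : (List Int × List Int) × List Int × Int) (p : Int × Int) : (List Int × List Int) × List Int × Int :=
  if p.2 ≠ st.2.2 then
    ((if bg.contains p.2 then st.1.1 else st.1.1 ++ [p.2],
      if bg.contains p.2 then st.1.2 else st.1.2 ++ [p.1]),
     (if bg.contains st.2.2 then st.2.1 else st.2.1 ++ [p.1]), p.2)
  else st

def finishA (bg : List Int) (m : Int) (st : (List Int × List Int) × List Int × Int) : List Int × List Int × List Int :=
  (st.1.1, st.1.2, if bg.contains st.2.2 then st.2.1 else st.2.1 ++ [m])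

lemma stepA_ne (bg : List Int) (L S E : List Int) (last i v : Int) (h : v ≠ last) :
    stepA bg ((L, S), E, last) (i, v) =
      ((L ++ (if bg.contains v then [] else [v]), S ++ (if bg.contains v then [] else [i])),
       (if bg.contains last then E else E ++ [i]), v) := by
  simp only [stepA, if_pos h]
  by_cases hv : v ∈ bg <;> simp [hv]

lemma unz_cons (bg : List Int) (r : Int × Int × Int) (R : List (Int × Int × Int)) :
    unz bg (r :: R) =
      ((if bg.contains r.1 then [] else [r.1]) ++ (unz bg R).1,
       (if bg.contains r.1 then [] else [r.2.1]) ++ (unz bg R).2.1,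
       (if bg.contains r.1 then [] else [r.2.2]) ++ (unz bg R).2.2) := by
  by_cases h : r.1 ∈ bg <;> simp [unz, List.filter_cons, h]

lemma A_aux (bg : List Int) (ys : List Int) : ∀ (cur start k : Int) (L S E : List Int),
    finishA bg (k + (ys.length : Int))
      ((PySem.List.enumerate ys k).foldl (stepA bg)
        ((L ++ (if bg.contains cur then [] else [cur]),
          S ++ (if bg.contains cur then [] else [start])), E, cur))
    = (L ++ (unz bg (runsAux cur start k ys)).1,
       S ++ (unz bg (runsAux cur start k ys)).2.1,
       E ++ (unz bg (runsAux cur start k ys)).2.2) := by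
  induction ys with
  | nil =>
    intro cur start k L S E
    simp [finishA, unz, runsAux, PySem.List.enumerate_nil, List.filter]
    by_cases h : cur ∈ bg <;> simp [h]
  | cons y ys ih =>
    intro cur start k L S E
    rw [PySem.List.enumerate_cons]
    have hb : k + (((y :: ys).length : Nat) : Int) = (k + 1) + (ys.length : Int) := by
      simp only [List.length_cons]; push_cast; ring
    by_cases h : y = cur
    · subst h
      rw [List.foldl_cons, show stepA bg
            ((L ++ (if bg.contains y then [] else [y]), S ++ (if bg.contains y then [] else [start])), E, y) (k, y) =
            ((L ++ (if bg.contains y then [] else [y]), S ++ (if bg.contains y then [] else [start])), E, y) from by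
          simp [stepA]]
      rw [hb, ih y start (k + 1) L S E]
      simp [runsAux]
    · simp only [List.foldl_cons]
      rw [stepA_ne bg _ _ E cur k y h, hb,
        ih y k (k + 1) (L ++ (if bg.contains cur then [] else [cur]))
          (S ++ (if bg.contains cur then [] else [start]))
          (if bg.contains cur then E else E ++ [k])]
      rw [show runsAux cur start k (y :: ys) = (cur, start, k) :: runsAux y k (k + 1) ys from by
        simp [runsAux, h]]
      rw [unz_cons]
      by_cases hc : cur ∈ bg <;> simp [hc, List.append_assoc]

lemma B_changes (ys : List Int) : ∀ (c k : Int),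
    (PySem.List.enumerate ((c :: ys).zip ys) k).filterMap
      (fun p => if p.2.1 ≠ p.2.2 then some (p.1 + 1) else none)
    = changes c (k + 1) ys := by
  induction ys with
  | nil => intro c k; simp [changes, PySem.List.enumerate_nil]
  | cons y ys ih =>
    intro c k
    rw [List.zip_cons_cons, PySem.List.enumerate_cons]
    by_cases h : y = c
    · subst h
      have he : List.filterMap (fun p : Int × Int × Int => if p.2.1 ≠ p.2.2 then some (p.1 + 1) else none)
          ((k, (y, y)) :: PySem.List.enumerate ((y :: ys).zip ys) (k + 1))
          = List.filterMap (fun p : Int × Int × Int => if p.2.1 ≠ p.2.2 then some (p.1 + 1) else none)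
            (PySem.List.enumerate ((y :: ys).zip ys) (k + 1)) := by
        rw [List.filterMap_cons]; simp
      rw [he, ih y (k + 1)]
      simp [changes]
    · have hcy : c ≠ y := fun e => h e.symm
      have he : List.filterMap (fun p : Int × Int × Int => if p.2.1 ≠ p.2.2 then some (p.1 + 1) else none)
          ((k, (c, y)) :: PySem.List.enumerate ((y :: ys).zip ys) (k + 1))
          = (k + 1) :: List.filterMap (fun p : Int × Int × Int => if p.2.1 ≠ p.2.2 then some (p.1 + 1) else none)
            (PySem.List.enumerate ((y :: ys).zip ys) (k + 1)) := by
        rw [List.filterMap_cons]; simp [hcy]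
      rw [he, ih y (k + 1)]
      simp [changes, h]

lemma zip_runs (ys : List Int) : ∀ (cur start k : Int),
    (start :: changes cur k ys).zip (changes cur k ys ++ [k + (ys.length : Int)])
    = (runsAux cur start k ys).map (fun r => (r.2.1, r.2.2)) := by
  induction ys with
  | nil => intro cur start k; simp [changes, runsAux]
  | cons y ys ih =>
    intro cur start k
    by_cases h : y = cur
    · subst h
      have hc : changes y k (y :: ys) = changes y (k + 1) ys := by simp [changes]
      have hr : runsAux y start k (y :: ys) = runsAux y start (k + 1) ys := by simp [runsAux]
      rw [hc, hr, show k + (((y :: ys).length : Nat) : Int) = (k + 1) + (ys.length : Int) from by simp only [List.length_cons]; push_cast; ring]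
      exact ih y start (k + 1)
    · have hc : changes cur k (y :: ys) = k :: changes y (k + 1) ys := by simp [changes, h]
      have hr : runsAux cur start k (y :: ys) = (cur, start, k) :: runsAux y k (k + 1) ys := by
        simp [runsAux, h]
      rw [hc, hr, show k + (((y :: ys).length : Nat) : Int) = (k + 1) + (ys.length : Int) from by simp only [List.length_cons]; push_cast; ring]
      simp only [List.cons_append, List.zip_cons_cons, List.map_cons]
      rw [ih y k (k + 1)]

lemma labels_runs (ys : List Int) : ∀ (cur start k : Int) (fw : List Int),
    PySem.List.pyGetD fw start 0 = cur →
    (∀ (j : Nat), j < ys.length → PySem.List.pyGetD fw (k + (j : Int)) 0 = ys[j]!) →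
    ∀ r ∈ runsAux cur start k ys, PySem.List.pyGetD fw r.2.1 0 = r.1 := by
  induction ys with
  | nil =>
    intro cur start k fw h0 _ r hr
    simp [runsAux] at hr
    subst hr; exact h0
  | cons y ys ih =>
    intro cur start k fw h0 hj r hr
    have hj' : ∀ (j : Nat), j < ys.length → PySem.List.pyGetD fw ((k + 1) + (j : Int)) 0 = ys[j]! := by
      intro j hjl
      have := hj (j + 1) (by simpa using Nat.succ_lt_succ hjl)
      rw [show k + ((j + 1 : Nat) : Int) = (k + 1) + (j : Int) from by push_cast; ring] at this
      simpa using this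
    by_cases h : y = cur
    · subst h
      rw [show runsAux y start k (y :: ys) = runsAux y start (k + 1) ys from by simp [runsAux]] at hr
      exact ih y start (k + 1) fw h0 hj' r hr
    · rw [show runsAux cur start k (y :: ys) = (cur, start, k) :: runsAux y k (k + 1) ys from by
          simp [runsAux, h]] at hr
      rcases List.mem_cons.mp hr with hr | hr
      · subst hr; exact h0
      · have hk : PySem.List.pyGetD fw k 0 = y := by
          have := hj 0 (by simp)
          simpa using this
        exact ih y k (k + 1) fw hk hj' r hr

lemma B_fold (bg fw : List Int) (R : List (Int × Int × Int))
    (h : ∀ r ∈ R, PySem.List.pyGetD fw r.2.1 0 = r.1) : ∀ (L S E : List Int),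
    (R.map (fun r => (r.2.1, r.2.2))).foldl
      (fun acc se =>
        let label := PySem.List.pyGetD fw se.1 0
        if bg.contains label then acc
        else (acc.1 ++ [label], acc.2.1 ++ [se.1], acc.2.2 ++ [se.2]))
      (L, S, E)
    = (L ++ (unz bg R).1, S ++ (unz bg R).2.1, E ++ (unz bg R).2.2) := by
  induction R with
  | nil => intro L S E; simp [unz]
  | cons r R ih =>
    intro L S E
    have hr : PySem.List.pyGetD fw r.2.1 0 = r.1 := h r (by simp)
    have hrest : ∀ r' ∈ R, PySem.List.pyGetD fw r'.2.1 0 = r'.1 := fun r' h' => h r' (by simp [h'])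
    simp only [List.map_cons, List.foldl_cons, hr]
    by_cases hc : bg.contains r.1 = true
    · rw [if_pos hc, ih hrest L S E]
      have hc' : r.1 ∈ bg := by simpa using hc
      simp [unz, List.filter_cons, hc']
    · rw [if_neg hc, ih hrest (L ++ [r.1]) (S ++ [r.2.1]) (E ++ [r.2.2])]
      have hc' : ¬ r.1 ∈ bg := by simpa using hc
      simp [unz, List.filter_cons, hc', List.append_assoc]

-- A equals the filtered runs
lemma A_eq_runs (bg : List Int) (f0 : Int) (rest : List Int) :
    get_labels_start_end_time (f0 :: rest) bg = unz bg (runsAux f0 0 1 rest) := by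
  have key : ∀ init, (PySem.List.pyRange 0 (PySem.List.len (f0 :: rest)) 1).foldl
      (fun st i =>
        if PySem.List.pyGetD (f0 :: rest) i 0 ≠ st.2.2 then
          ((if bg.contains (PySem.List.pyGetD (f0 :: rest) i 0) then st.1.1
              else st.1.1 ++ [PySem.List.pyGetD (f0 :: rest) i 0],
            if bg.contains (PySem.List.pyGetD (f0 :: rest) i 0) then st.1.2 else st.1.2 ++ [i]),
           (if bg.contains st.2.2 then st.2.1 else st.2.1 ++ [i]),
           PySem.List.pyGetD (f0 :: rest) i 0)
        else st) init
      = (PySem.List.enumerate (f0 :: rest) 0).foldl (stepA bg) init := by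
    intro init
    rw [PySem.List.enumerate_eq_map_pyRange (f0 :: rest) 0, List.foldl_map]
    rfl
  unfold get_labels_start_end_time
  simp only
  rw [key]
  rw [PySem.List.enumerate_cons, List.foldl_cons,
    show stepA bg (if bg.contains f0 then ((([] : List Int), ([] : List Int)), ([] : List Int), f0)
        else (([f0], [(0 : Int)]), ([] : List Int), f0)) (0, f0) =
      (if bg.contains f0 then ((([] : List Int), ([] : List Int)), ([] : List Int), f0)
        else (([f0], [(0 : Int)]), ([] : List Int), f0)) from by
      by_cases h : f0 ∈ bg <;> simp [stepA, h]]
  have hinit : (if bg.contains f0 then ((([] : List Int), ([] : List Int)), ([] : List Int), f0)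
      else (([f0], [(0 : Int)]), ([] : List Int), f0)) =
      ((([] : List Int) ++ (if bg.contains f0 then [] else [f0]),
        ([] : List Int) ++ (if bg.contains f0 then [] else [(0 : Int)])), ([] : List Int), f0) := by
    by_cases h : f0 ∈ bg <;> simp [h]
  rw [hinit]
  have hmain := A_aux bg rest f0 0 1 [] [] []
  have hlen : (1 : Int) + (rest.length : Int) = (PySem.List.len (f0 :: rest)) := by
    simp [PySem.List.len_eq]; ring
  rw [hlen] at hmain
  unfold finishA at hmain
  simp only [List.nil_append] at hmain ⊢
  exact hmain
-- B equals the filtered runs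
lemma B_eq_runs (bg : List Int) (f0 : Int) (rest : List Int) :
    get_labels_start_end_time_alt (f0 :: rest) bg = unz bg (runsAux f0 0 1 rest) := by
  unfold get_labels_start_end_time_alt
  simp only [PySem.List.slice_from_one, List.tail_cons]
  have hch := B_changes rest f0 0
  rw [show (0 : Int) + 1 = 1 from by norm_num] at hch
  rw [hch]
  have hlen : (PySem.List.len (f0 :: rest)) = (1 : Int) + (rest.length : Int) := by
    simp [PySem.List.len_eq]; ring
  rw [hlen]
  rw [zip_runs rest f0 0 1]
  have hlab : ∀ r ∈ runsAux f0 0 1 rest, PySem.List.pyGetD (f0 :: rest) r.2.1 0 = r.1 := by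
    apply labels_runs rest f0 0 1 (f0 :: rest)
    · simp [PySem.List.pyGetD_zero_cons]
    · intro j hjl
      rw [show (1 : Int) + (j : Int) = ((j + 1 : Nat) : Int) from by push_cast; ring]
      rw [PySem.List.pyGetD_natCast]
      simp [List.getD, List.getElem?_cons_succ, List.getElem?_eq_getElem hjl,
        List.getElem!_eq_getElem?_getD, List.getElem?_eq_getElem hjl]
  rw [B_fold bg (f0 :: rest) (runsAux f0 0 1 rest) hlab [] [] []]
  simp

-- ===== VERDICT (by name: the statement is the Claim_ definition above) =====
theorem get_labels_start_end_time_spec : Claim_equal_get_labels_start_end_time := by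
  intro fw bg _hdom hpre
  unfold Spec_get_labels_start_end_time
  match fw, hpre with
  | f0 :: rest, _ => rw [A_eq_runs, B_eq_runs]
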